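-- pv_equiv track=rewrite | github.com/Viniciuscoding/google_ai_competition_2024 | transcribler-backend/data/python scripts/main.py | parse_sentiment
-- ===== SOURCE A (Python) =====
-- def parse_sentiment(sentiment):
--     data = {}
--     current_key = None
--     current_value = []
--
--     lines = sentiment.strip().split("\n")
--
--     for line in lines:
--         if "**" in line:
--             if current_key:
--                 data[current_key] = "\n".join(current_value).strip()
--             key = line.split("**")[1].strip(":")
--             value = line.split(":**")[1].strip()
--             current_key = key
--             current_value = [value]
--         elif current_key:
--             current_value.append(line.strip())
--
--     if current_key:
--         data[current_key] = "\n".join(current_value).strip()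
--
--     return data
-- ===== SOURCE B (Python) =====
-- def parse_sentiment(sentiment):
--     lines = sentiment.strip().split("\n")
--     # Phase 1: partition into (header, body) blocks, dropping pre-header lines.
--     blocks = []
--     i, n = 0, len(lines)
--     while i < n:
--         if "**" not in lines[i]:
--             i += 1
--             continue
--         j = i + 1
--         while j < n and "**" not in lines[j]:
--             j += 1
--         blocks.append((lines[i], lines[i + 1:j]))
--         i = j
--     # Phase 2: map each block to a (key, value) entry; later keys overwrite.
--     data = {}
--     for head, body in blocks:
--         key = head.split("**")[1].strip(":")
--         value = "\n".join([head.split(":**")[1].strip()] + [l.strip() for l in body]).strip()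
--         if key:
--             data[key] = value
--     return data
-- ===== Notes on version B (the rewrite author's own statement) =====
-- stated objective: alternative
-- what changed: Replaces A's stateful single pass (current_key/current_value with flush-on-header and a trailing flush) by two structurally distinct passes: first partition the lines into (header, body) blocks with an index scan, then fold the blocks into the dict.
import Mathlib
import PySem

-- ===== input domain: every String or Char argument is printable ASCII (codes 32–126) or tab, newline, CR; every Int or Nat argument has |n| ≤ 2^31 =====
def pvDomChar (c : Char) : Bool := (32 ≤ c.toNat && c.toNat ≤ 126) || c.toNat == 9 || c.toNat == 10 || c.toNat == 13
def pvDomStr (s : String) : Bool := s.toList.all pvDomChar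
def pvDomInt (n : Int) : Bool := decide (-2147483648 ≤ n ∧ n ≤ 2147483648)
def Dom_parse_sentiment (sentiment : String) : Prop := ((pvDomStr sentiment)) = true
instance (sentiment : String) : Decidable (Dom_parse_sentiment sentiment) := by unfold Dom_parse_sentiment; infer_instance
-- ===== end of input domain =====

-- B replaces A's stateful flush-on-header single pass by two passes — partition the lines
-- into (header, body) blocks, then fold the blocks into the dict — same values (objective: alternative).

-- shared by both ports: both Pythons compute key/value from a header line by the
-- SAME expressions line.split("**")[1].strip(":") and line.split(":**")[1].strip()
-- (the .getD defaults are never reached inside Pre_parse_sentiment)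
def pvKey (line : String) : String :=
  PySem.Str.stripChars ((PySem.List.pyGet? ((PySem.Str.split? line "**").getD []) 1).getD "") ":"
def pvVal (line : String) : String :=
  PySem.Str.strip ((PySem.List.pyGet? ((PySem.Str.split? line ":**").getD []) 1).getD "")

-- ===== PORT A =====
-- A's loop state: (data, current_key, current_value); current_key None → none,
-- Python's `if current_key:` is `some k` with k ≠ "".
def pvStepA (st : PySem.Dict String String × Option String × List String) (line : String) :
    PySem.Dict String String × Option String × List String :=
  if PySem.Str.isIn "**" line then
    let data :=
      match st.2.1 with
      | some k => if k ≠ "" then st.1.insert k (PySem.Str.strip (PySem.Str.join "\n" st.2.2)) else st.1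
      | none => st.1
    (data, some (pvKey line), [pvVal line])
  else
    match st.2.1 with
    | some k => if k ≠ "" then (st.1, st.2.1, st.2.2 ++ [PySem.Str.strip line]) else st
    | none => st

-- the trailing `if current_key: data[current_key] = ...`
def pvFlushA (st : PySem.Dict String String × Option String × List String) :
    PySem.Dict String String :=
  match st.2.1 with
  | some k => if k ≠ "" then st.1.insert k (PySem.Str.strip (PySem.Str.join "\n" st.2.2)) else st.1
  | none => st.1

def parse_sentiment (sentiment : String) : List (String × String) :=
  (pvFlushA (((PySem.Str.split? (PySem.Str.strip sentiment) "\n").getD []).foldl pvStepA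
    (PySem.Dict.empty, none, []))).items

-- ===== PORT B =====
-- phase 1 of Source B: partition the lines into (header, body) blocks, dropping pre-header lines
def pvBlocksB : List String → List (String × List String)
  | [] => []
  | l :: rest =>
    if PySem.Str.isIn "**" l then
      (l, rest.takeWhile (fun x => !PySem.Str.isIn "**" x)) ::
        pvBlocksB (rest.dropWhile (fun x => !PySem.Str.isIn "**" x))
    else
      pvBlocksB rest
termination_by xs => xs.length
decreasing_by
  · exact Nat.lt_succ_of_le (List.length_dropWhile_le _ _)
  · simp

-- phase 2 of Source B: one block becomes one dict entry (skipped when the key is empty)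
def pvInsB (d : PySem.Dict String String) (b : String × List String) : PySem.Dict String String :=
  let key := pvKey b.1
  let value := PySem.Str.strip (PySem.Str.join "\n" (pvVal b.1 :: b.2.map PySem.Str.strip))
  if key ≠ "" then d.insert key value else d

def parse_sentiment_alt (sentiment : String) : List (String × String) :=
  ((pvBlocksB ((PySem.Str.split? (PySem.Str.strip sentiment) "\n").getD [])).foldl pvInsB
    PySem.Dict.empty).items

-- ===== PRECONDITION & SPEC =====
-- Pre_ excludes exactly the inputs on which A raises IndexError: a line that contains "**"
-- but not ":**" makes line.split(":**")[1] fail (B raises there too).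
def Pre_parse_sentiment (sentiment : String) : Prop :=
  ∀ line ∈ (PySem.Str.split? (PySem.Str.strip sentiment) "\n").getD [],
    PySem.Str.isIn "**" line = true → PySem.Str.isIn ":**" line = true
instance (sentiment : String) : Decidable (Pre_parse_sentiment sentiment) := by
  unfold Pre_parse_sentiment; infer_instance

def pvWitness_parse_sentiment : String := "**Mood:** good\nreally good\n**Tone:** calm"

def Spec_parse_sentiment (sentiment : String) (out : List (String × String)) : Prop := out = parse_sentiment_alt sentiment
instance (sentiment : String) (out : List (String × String)) : Decidable (Spec_parse_sentiment sentiment out) := by unfold Spec_parse_sentiment; infer_instance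

-- ===== CLAIM (what is proved, stated in full; the proofs are below) =====
def Claim_equal_parse_sentiment : Prop := ∀ (sentiment : String), Dom_parse_sentiment sentiment → Pre_parse_sentiment sentiment → Spec_parse_sentiment sentiment (parse_sentiment sentiment)

-- ===== LEMMAS AND PROOFS =====

-- a run of non-header lines only extends current_value (or is dropped when the key is falsy)
lemma pvBodyA (body : List String) (h : ∀ x ∈ body, PySem.Str.isIn "**" x = false)
    (d : PySem.Dict String String) (k : String) (cv : List String) :
    body.foldl pvStepA (d, some k, cv) =
      (d, some k, if k = "" then cv else cv ++ body.map PySem.Str.strip) := by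
  induction body generalizing cv with
  | nil => simp
  | cons l rest ih =>
      have hlc : PySem.Chars.isIn ['*', '*'] l.toList = false := by simpa using h l (by simp)
      have hrest : ∀ x ∈ rest, PySem.Str.isIn "**" x = false := fun x hx => h x (by simp [hx])
      have hstep : pvStepA (d, some k, cv) l =
          (d, some k, if k = "" then cv else cv ++ [PySem.Str.strip l]) := by
        by_cases hk : k = "" <;> simp [pvStepA, hlc, hk]
      rw [List.foldl_cons, hstep]
      by_cases hk : k = ""
      · simpa [hk] using ih hrest cv
      · have := ih hrest (cv ++ [PySem.Str.strip l])
        simpa [hk, List.append_assoc] using this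

-- main invariant, in the shape of pvBlocksB's recursion: from a state with a current key,
-- A's remaining fold + final flush equals B's block fold from the flushed dict
lemma pvL2 (lines : List String) (d : PySem.Dict String String) (k : String) (cv : List String) :
    pvFlushA (lines.foldl pvStepA (d, some k, cv)) =
      (pvBlocksB (lines.dropWhile (fun x => !PySem.Str.isIn "**" x))).foldl pvInsB
        (if k ≠ "" then
          d.insert k (PySem.Str.strip (PySem.Str.join "\n"
            (cv ++ (lines.takeWhile (fun x => !PySem.Str.isIn "**" x)).map PySem.Str.strip)))
         else d) := by
  induction lines using pvBlocksB.induct generalizing d k cv with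
  | case1 => by_cases hk : k = "" <;> simp [pvBlocksB, pvFlushA, hk]
  | case2 l rest hl ih =>
      have hlc : PySem.Chars.isIn ['*', '*'] l.toList = true := by simpa using hl
      have hbody : ∀ x ∈ rest.takeWhile (fun x => !PySem.Str.isIn "**" x),
          PySem.Str.isIn "**" x = false := by
        intro x hx; have := List.mem_takeWhile_imp hx; simpa using this
      have hstep : pvStepA (d, some k, cv) l =
          ((if k ≠ "" then d.insert k (PySem.Str.strip (PySem.Str.join "\n" cv)) else d),
            some (pvKey l), [pvVal l]) := by
        by_cases hk : k = "" <;> simp [pvStepA, hlc, hk]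
      have htw : (rest.dropWhile (fun x => !PySem.Str.isIn "**" x)).takeWhile
          (fun x => !PySem.Str.isIn "**" x) = [] := by
        cases hdrop : rest.dropWhile (fun x => !PySem.Str.isIn "**" x) with
        | nil => simp
        | cons y ys =>
            have hne : rest.dropWhile (fun x => !PySem.Str.isIn "**" x) ≠ [] := by
              rw [hdrop]; simp
            have h2 := List.head_dropWhile_not (fun x => !PySem.Str.isIn "**" x) hne
            simp only [hdrop, List.head_cons] at h2
            have h2' : PySem.Chars.isIn ['*', '*'] y.toList = true := by simpa using h2
            simp [h2']
      have hrw : rest = rest.takeWhile (fun x => !PySem.Str.isIn "**" x) ++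
          rest.dropWhile (fun x => !PySem.Str.isIn "**" x) :=
        (List.takeWhile_append_dropWhile).symm
      rw [List.foldl_cons, hstep]
      conv_lhs => rw [hrw]
      rw [List.foldl_append, pvBodyA _ hbody, ih, htw,
        List.dropWhile_idempotent]
      have hdwl : (l :: rest).dropWhile (fun x => !PySem.Str.isIn "**" x) = l :: rest := by
        simp [hlc]
      have htwl : (l :: rest).takeWhile (fun x => !PySem.Str.isIn "**" x) = [] := by
        simp [hlc]
      have hbl : pvBlocksB (l :: rest) =
          (l, rest.takeWhile (fun x => !PySem.Str.isIn "**" x)) ::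
            pvBlocksB (rest.dropWhile (fun x => !PySem.Str.isIn "**" x)) := by
        rw [pvBlocksB]; simp [hlc]
      rw [hdwl, htwl, hbl, List.foldl_cons]
      by_cases hkey : pvKey l = "" <;> by_cases hk : k = "" <;>
        simp [pvInsB, hkey, hk]
  | case3 l rest hl ih =>
      have hlc : PySem.Chars.isIn ['*', '*'] l.toList = false := by simpa using hl
      have hstep : pvStepA (d, some k, cv) l =
          (d, some k, if k = "" then cv else cv ++ [PySem.Str.strip l]) := by
        by_cases hk : k = "" <;> simp [pvStepA, hlc, hk]
      rw [List.foldl_cons, hstep]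
      have hdwl : (l :: rest).dropWhile (fun x => !PySem.Str.isIn "**" x) =
          rest.dropWhile (fun x => !PySem.Str.isIn "**" x) := by
        simp [hlc]
      have htwl : (l :: rest).takeWhile (fun x => !PySem.Str.isIn "**" x) =
          l :: rest.takeWhile (fun x => !PySem.Str.isIn "**" x) := by
        simp [hlc]
      rw [hdwl, htwl]
      by_cases hk : k = ""
      · simpa [hk] using ih d k cv
      · have := ih d k (cv ++ [PySem.Str.strip l])
        simpa [hk, List.append_assoc] using this

-- top level: from the initial (empty, None, []) state
lemma pvL1 (lines : List String) (d : PySem.Dict String String) :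
    pvFlushA (lines.foldl pvStepA (d, none, [])) = (pvBlocksB lines).foldl pvInsB d := by
  induction lines using pvBlocksB.induct generalizing d with
  | case1 => simp [pvBlocksB, pvFlushA]
  | case2 l rest hl ih =>
      have hlc : PySem.Chars.isIn ['*', '*'] l.toList = true := by simpa using hl
      have hstep : pvStepA (d, none, []) l = (d, some (pvKey l), [pvVal l]) := by
        simp [pvStepA, hlc]
      rw [List.foldl_cons, hstep, pvL2]
      have hbl : pvBlocksB (l :: rest) =
          (l, rest.takeWhile (fun x => !PySem.Str.isIn "**" x)) ::
            pvBlocksB (rest.dropWhile (fun x => !PySem.Str.isIn "**" x)) := by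
        rw [pvBlocksB]; simp [hlc]
      rw [hbl, List.foldl_cons]
      by_cases hkey : pvKey l = "" <;> simp [pvInsB, hkey]
  | case3 l rest hl ih =>
      have hlc : PySem.Chars.isIn ['*', '*'] l.toList = false := by simpa using hl
      have hstep : pvStepA (d, none, []) l = (d, none, []) := by simp [pvStepA, hlc]
      have hbl : pvBlocksB (l :: rest) = pvBlocksB rest := by
        rw [pvBlocksB]; simp [hlc]
      rw [List.foldl_cons, hstep, ih, hbl]

-- ===== VERDICT (by name: the statement is the Claim_ definition above) =====
theorem parse_sentiment_spec : Claim_equal_parse_sentiment := by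
  intro s _ _
  unfold Spec_parse_sentiment parse_sentiment parse_sentiment_alt
  rw [pvL1]
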